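-- pv_equiv track=rewrite | github.com/FonaTech/Project_Chronos_In_Experimental | chronos/io/cluster_layout.py | _normalize_clusters
-- ===== SOURCE A (Python) =====
-- from typing import Any, List, Dict, Tuple
--
-- def _normalize_clusters(clusters: List[List[int]], num_experts: int) -> List[List[int]]:
--     seen = set()
--     out: list[list[int]] = []
--     for cluster in clusters:
--         clean = []
--         for eid in cluster:
--             eid = int(eid)
--             if 0 <= eid < num_experts and eid not in seen:
--                 clean.append(eid)
--                 seen.add(eid)
--         if clean:
--             out.append(sorted(clean))
--     for eid in range(num_experts):
--         if eid not in seen: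
--             out.append([eid])
--     return out
-- ===== SOURCE B (Python) =====
-- def _normalize_clusters(clusters, num_experts):
--     # Expert-major scan: each in-range expert belongs to the first cluster that
--     # contains it, or to a trailing singleton. Ascending eid order makes every
--     # group already sorted, so no per-cluster sort or seen-set is needed.
--     def first_owner(eid):
--         for i, cluster in enumerate(clusters):
--             if eid in cluster:
--                 return i
--         return None
--     groups = {}
--     free = []
--     for eid in range(num_experts):
--         i = first_owner(eid)
--         if i is None:
--             free.append([eid])
--         else:
--             groups.setdefault(i, []).append(eid)
--     return [groups[i] for i in range(len(clusters)) if i in groups] + free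
-- ===== Notes on version B (the rewrite author's own statement) =====
-- stated objective: alternative
-- what changed: Inverts the iteration: instead of A's cluster-major pass with a seen-set, per-cluster dedup and per-cluster sort, B iterates experts 0..num_experts-1, assigns each to the first cluster containing it (or to a free singleton), and groups by cluster index - ascending eid order makes groups sorted for free, so no sort and no seen-set exist.
import Mathlib
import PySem

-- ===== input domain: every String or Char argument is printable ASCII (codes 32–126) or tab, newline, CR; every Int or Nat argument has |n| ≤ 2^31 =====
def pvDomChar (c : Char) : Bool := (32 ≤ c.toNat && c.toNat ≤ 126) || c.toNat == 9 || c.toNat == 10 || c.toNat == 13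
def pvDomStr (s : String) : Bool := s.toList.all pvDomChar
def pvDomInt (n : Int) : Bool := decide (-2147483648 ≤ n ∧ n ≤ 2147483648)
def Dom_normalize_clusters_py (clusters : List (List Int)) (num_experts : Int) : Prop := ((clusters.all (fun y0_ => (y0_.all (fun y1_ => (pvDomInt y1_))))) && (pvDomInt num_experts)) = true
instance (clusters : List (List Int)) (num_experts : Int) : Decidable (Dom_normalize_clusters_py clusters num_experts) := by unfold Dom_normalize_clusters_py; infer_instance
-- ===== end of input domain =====

-- B inverts A's iteration: experts 0..num_experts-1 are scanned in ascending order and each is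
-- assigned to the first cluster containing it (or a trailing singleton); no seen-set and no sort
-- remain. Return values proved equal on the stated input domain.

-- ===== PORT A =====
def normalize_clusters_py (clusters : List (List Int)) (num_experts : Int) : List (List Int) :=
  let st := clusters.foldl
    (fun (st : PySem.Set Int × List (List Int)) cluster =>
      let cs := cluster.foldl
        (fun (cs : List Int × PySem.Set Int) eid =>
          if 0 ≤ eid ∧ eid < num_experts ∧ eid ∉ cs.2 then
            (cs.1 ++ [eid], PySem.Set.add cs.2 eid)
          else cs)
        ([], st.1)
      if cs.1 ≠ [] then (cs.2, st.2 ++ [PySem.List.sorted cs.1 (fun x => x) false])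
      else (cs.2, st.2))
    ((PySem.Set.empty : PySem.Set Int), ([] : List (List Int)))
  (PySem.List.pyRange 0 num_experts 1).foldl
    (fun out eid => if eid ∉ st.1 then out ++ [[eid]] else out) st.2

-- ===== PORT B =====
-- Source B's helper first_owner: index of the first cluster containing eid, else None
def pyFirstOwner (clusters : List (List Int)) (eid : Int) : Option Int :=
  ((PySem.List.enumerate clusters 0).find? (fun p => p.2.contains eid)).map (·.1)

def normalize_clusters_py_alt (clusters : List (List Int)) (num_experts : Int) : List (List Int) :=
  let st := (PySem.List.pyRange 0 num_experts 1).foldl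
    (fun (st : PySem.Dict Int (List Int) × List (List Int)) eid =>
      match pyFirstOwner clusters eid with
      | none => (st.1, st.2 ++ [[eid]])
      | some i => (st.1.modify i [] (fun g => g ++ [eid]), st.2))   -- groups.setdefault(i, []).append(eid)
    ((PySem.Dict.empty : PySem.Dict Int (List Int)), ([] : List (List Int)))
  -- [groups[i] for i in range(len(clusters)) if i in groups]  (groups[i] = getD, guarded by contains) + free
  ((PySem.List.pyRange 0 (clusters.length : Int) 1).filter (fun i => st.1.contains i)).map
    (fun i => st.1.getD i []) ++ st.2

-- ===== PRECONDITION & SPEC =====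
def Spec_normalize_clusters_py (clusters : List (List Int)) (num_experts : Int) (out : List (List Int)) : Prop := out = normalize_clusters_py_alt clusters num_experts
instance (clusters : List (List Int)) (num_experts : Int) (out : List (List Int)) : Decidable (Spec_normalize_clusters_py clusters num_experts out) := by unfold Spec_normalize_clusters_py; infer_instance

-- ===== CLAIM (what is proved, stated in full; the proofs are below) =====
def Claim_equal_normalize_clusters_py : Prop := ∀ (clusters : List (List Int)) (num_experts : Int), Dom_normalize_clusters_py clusters num_experts → Spec_normalize_clusters_py clusters num_experts (normalize_clusters_py clusters num_experts)

-- ===== LEMMAS AND PROOFS =====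

-- the new (in-range, unseen) ids contributed by one cluster, in first-occurrence order
def pvNews (n : Int) (seen : List Int) : List Int → List Int
  | [] => []
  | e :: r => if 0 ≤ e ∧ e < n ∧ e ∉ seen then e :: pvNews n (seen ++ [e]) r else pvNews n seen r

-- per-cluster contributed blocks (possibly empty), in cluster order
def pvBlocks (n : Int) (seen : List Int) : List (List Int) → List (List Int)
  | [] => []
  | c :: r => pvNews n seen c :: pvBlocks n (seen ++ pvNews n seen c) r

def pvSeenAfter (n : Int) (seen : List Int) : List (List Int) → List Int
  | [] => seen
  | c :: r => pvSeenAfter n (seen ++ pvNews n seen c) r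

-- first index of a cluster containing e
def pvFI : List (List Int) → Int → Option Nat
  | [], _ => none
  | c :: r, e => if e ∈ c then some 0 else (pvFI r e).map (· + 1)

-- the group of cluster j in B's terms: in-range experts whose first owner is j, ascending
def pvGrp (clusters : List (List Int)) (n : Int) (j : Nat) : List Int :=
  (PySem.List.pyRange 0 n 1).filter (fun e => decide (pvFI clusters e = some j))

theorem pvInnerA (n : Int) : ∀ (c : List Int) (c0 seen : List Int),
    c.foldl (fun (cs : List Int × PySem.Set Int) eid =>
        if 0 ≤ eid ∧ eid < n ∧ eid ∉ cs.2 then (cs.1 ++ [eid], PySem.Set.add cs.2 eid) else cs)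
      (c0, seen)
    = (c0 ++ pvNews n seen c, seen ++ pvNews n seen c) := by
  intro c
  induction c with
  | nil => intro c0 seen; simp [pvNews]
  | cons e r ih =>
    intro c0 seen
    by_cases h : 0 ≤ e ∧ e < n ∧ e ∉ seen
    · have hadd : PySem.Set.add seen e = seen ++ [e] := by
        simp [PySem.Set.add, PySem.Set.contains, h.2.2]
      simp only [List.foldl_cons, if_pos h, hadd, pvNews, ih]
      simp
    · simp only [List.foldl_cons, if_neg h, ih]
      simp [pvNews, h]

theorem pvOuterA (n : Int) : ∀ (cs : List (List Int)) (seen : List Int) (out : List (List Int)),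
    cs.foldl (fun (st : PySem.Set Int × List (List Int)) cluster =>
        let csr := cluster.foldl
          (fun (cs : List Int × PySem.Set Int) eid =>
            if 0 ≤ eid ∧ eid < n ∧ eid ∉ cs.2 then (cs.1 ++ [eid], PySem.Set.add cs.2 eid) else cs)
          ([], st.1)
        if csr.1 ≠ [] then (csr.2, st.2 ++ [PySem.List.sorted csr.1 (fun x => x) false])
        else (csr.2, st.2))
      (seen, out)
    = (pvSeenAfter n seen cs,
       out ++ ((pvBlocks n seen cs).filter (fun b => decide (b ≠ []))).map
         (fun g => PySem.List.sorted g (fun x => x) false)) := by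
  intro cs
  induction cs with
  | nil => intro seen out; simp [pvSeenAfter, pvBlocks]
  | cons c r ih =>
    intro seen out
    simp only [List.foldl_cons, pvInnerA n c [] seen, List.nil_append]
    by_cases h : pvNews n seen c ≠ []
    · simp only [if_pos h, ih, pvSeenAfter, pvBlocks, List.filter_cons]
      simp [h]
    · simp only [if_neg h, ih, pvSeenAfter, pvBlocks, List.filter_cons]
      simp only [ne_eq, not_not] at h
      simp [h]

-- membership in pvNews
theorem pvNews_mem (n : Int) : ∀ (c s : List Int) (e : Int),
    e ∈ pvNews n s c ↔ (0 ≤ e ∧ e < n ∧ e ∈ c ∧ e ∉ s) := by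
  intro c
  induction c with
  | nil => intro s e; simp [pvNews]
  | cons a r ih =>
    intro s e
    by_cases h : 0 ≤ a ∧ a < n ∧ a ∉ s
    · simp only [pvNews, if_pos h, List.mem_cons, ih, List.mem_append]
      by_cases he : e = a
      · subst he; simp [h.1, h.2.1, h.2.2]
      · simp only [he, false_or]; tauto
    · simp only [pvNews, if_neg h, ih, List.mem_cons]
      by_cases he : e = a
      · subst he
        constructor
        · rintro ⟨h1, h2, h3, h4⟩; exact ⟨h1, h2, Or.inl rfl, h4⟩
        · rintro ⟨h1, h2, _, h4⟩; exact absurd ⟨h1, h2, h4⟩ h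
      · simp only [he, false_or]

theorem pvNews_nodup (n : Int) : ∀ (c s : List Int), (pvNews n s c).Nodup := by
  intro c
  induction c with
  | nil => intro s; simp [pvNews]
  | cons a r ih =>
    intro s
    by_cases h : 0 ≤ a ∧ a < n ∧ a ∉ s
    · simp only [pvNews, if_pos h, List.nodup_cons]
      refine ⟨fun hmem => ?_, ih (s ++ [a])⟩
      have := (pvNews_mem n r (s ++ [a]) a).mp hmem
      exact this.2.2.2 (by simp)
    · simpa only [pvNews, if_neg h] using ih s

theorem pvSeenAfter_mem (n : Int) : ∀ (cs : List (List Int)) (s : List Int) (e : Int),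
    e ∈ pvSeenAfter n s cs ↔ e ∈ s ∨ (0 ≤ e ∧ e < n ∧ e ∈ cs.flatten) := by
  intro cs
  induction cs with
  | nil => intro s e; simp [pvSeenAfter]
  | cons c r ih =>
    intro s e
    simp only [pvSeenAfter, ih, List.mem_append, pvNews_mem, List.flatten_cons]
    tauto

theorem pvFI_none : ∀ (cs : List (List Int)) (e : Int), pvFI cs e = none ↔ e ∉ cs.flatten := by
  intro cs
  induction cs with
  | nil => intro e; simp [pvFI]
  | cons c r ih =>
    intro e
    by_cases h : e ∈ c
    · simp [pvFI, h]
    · simp [pvFI, h, ih]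

theorem pvFI_lt : ∀ (cs : List (List Int)) (e : Int) (j : Nat), pvFI cs e = some j → j < cs.length := by
  intro cs
  induction cs with
  | nil => intro e j h; simp [pvFI] at h
  | cons c r ih =>
    intro e j h
    by_cases hm : e ∈ c
    · have hj : j = 0 := by simp [pvFI, hm] at h; omega
      subst hj; simp
    · simp only [pvFI, if_neg hm, Option.map_eq_some_iff] at h
      obtain ⟨k, hk, rfl⟩ := h
      have := ih e k hk
      simp only [List.length_cons]; omega

theorem pvFI_append_mem : ∀ (xs ys : List (List Int)) (e : Int), e ∈ xs.flatten →
    pvFI (xs ++ ys) e = pvFI xs e := by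
  intro xs
  induction xs with
  | nil => intro ys e h; simp at h
  | cons c r ih =>
    intro ys e h
    by_cases hm : e ∈ c
    · simp [pvFI, hm]
    · simp only [List.flatten_cons, List.mem_append, hm, false_or] at h
      simp [pvFI, hm, ih ys e h]

theorem pvFI_append : ∀ (xs ys : List (List Int)) (e : Int), e ∉ xs.flatten →
    pvFI (xs ++ ys) e = (pvFI ys e).map (· + xs.length) := by
  intro xs
  induction xs with
  | nil => intro ys e _; simp [Option.map_id']
  | cons c r ih =>
    intro ys e h
    simp only [List.flatten_cons, List.mem_append, not_or] at h
    simp only [List.cons_append, pvFI, if_neg h.1, ih ys e h.2, Option.map_map]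
    congr 1

theorem pyFirstOwner_aux : ∀ (cs : List (List Int)) (k : Int) (e : Int),
    ((PySem.List.enumerate cs k).find? (fun p => p.2.contains e)).map (·.1)
    = (pvFI cs e).map (fun j => k + (j : Int)) := by
  intro cs
  induction cs with
  | nil => intro k e; simp [PySem.List.enumerate_nil, pvFI]
  | cons c r ih =>
    intro k e
    rw [PySem.List.enumerate_cons]
    by_cases hm : e ∈ c
    · rw [List.find?_cons_of_pos (by simpa using hm)]
      simp [pvFI, hm]
    · rw [List.find?_cons_of_neg (by simpa using hm)]
      rw [ih (k + 1) e]
      simp only [pvFI, if_neg hm]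
      cases hfi : pvFI r e with
      | none => simp
      | some j => simp; ring

theorem pyFirstOwner_eq : ∀ (cs : List (List Int)) (e : Int),
    pyFirstOwner cs e = (pvFI cs e).map (fun j => (j : Int)) := by
  intro cs e
  unfold pyFirstOwner
  rw [pyFirstOwner_aux cs 0 e]
  simp

theorem pvSeenAfter_append (n : Int) : ∀ (xs ys : List (List Int)) (s : List Int),
    pvSeenAfter n s (xs ++ ys) = pvSeenAfter n (pvSeenAfter n s xs) ys := by
  intro xs
  induction xs with
  | nil => intro ys s; simp [pvSeenAfter]
  | cons c r ih => intro ys s; simp [pvSeenAfter, ih]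

theorem pvGrp_nodup (cs : List (List Int)) (n : Int) (j : Nat) : (pvGrp cs n j).Nodup :=
  ((PySem.List.pairwise_lt_pyRange_one 0 n).filter _).imp (fun h => ne_of_lt h)

theorem pvGrp_mem (cs : List (List Int)) (n : Int) (j : Nat) (e : Int) :
    e ∈ pvGrp cs n j ↔ (0 ≤ e ∧ e < n) ∧ pvFI cs e = some j := by
  unfold pvGrp
  rw [List.mem_filter, PySem.List.mem_pyRange_one]
  simp

-- the head block: the ids first claimed by cluster c after the clusters of pre
theorem pvGrp_head (n : Int) (pre : List (List Int)) (c : List Int) (r : List (List Int)) :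
    PySem.List.sorted (pvNews n (pvSeenAfter n [] pre) c) (fun x => x) false
    = pvGrp (pre ++ c :: r) n pre.length := by
  apply PySem.List.sorted_eq_of_perm_of_pairwise_lt
  · rw [List.perm_ext_iff_of_nodup (pvGrp_nodup _ n _) (pvNews_nodup n c _)]
    intro e
    rw [pvGrp_mem, pvNews_mem]
    constructor
    · rintro ⟨⟨h0, h1⟩, hfi⟩
      have hnp : e ∉ pre.flatten := by
        intro hmem
        rw [pvFI_append_mem pre (c :: r) e hmem] at hfi
        exact absurd (pvFI_lt pre e pre.length hfi) (lt_irrefl _)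
      rw [pvFI_append pre (c :: r) e hnp] at hfi
      rcases Option.map_eq_some_iff.mp hfi with ⟨j, hj, hjl⟩
      have hj0 : j = 0 := by omega
      subst hj0
      have hc : e ∈ c := by
        by_contra hc
        simp only [pvFI, if_neg hc, Option.map_eq_some_iff] at hj
        rcases hj with ⟨k, _, hk⟩
        omega
      refine ⟨h0, h1, hc, fun hS => ?_⟩
      rcases (pvSeenAfter_mem n pre [] e).mp hS with h | h
      · simp at h
      · exact hnp h.2.2
    · rintro ⟨h0, h1, hc, hS⟩
      have hnp : e ∉ pre.flatten := fun hmem =>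
        hS ((pvSeenAfter_mem n pre [] e).mpr (Or.inr ⟨h0, h1, hmem⟩))
      refine ⟨⟨h0, h1⟩, ?_⟩
      rw [pvFI_append pre (c :: r) e hnp]
      simp [pvFI, hc]
  · exact (PySem.List.pairwise_lt_pyRange_one 0 n).filter _

-- the A-side blocks, sorted, are exactly the per-index groups
theorem pvBlocks_eq_groups (n : Int) : ∀ (cs pre : List (List Int)),
    (pvBlocks n (pvSeenAfter n [] pre) cs).map (fun g => PySem.List.sorted g (fun x => x) false)
    = (List.range cs.length).map (fun j => pvGrp (pre ++ cs) n (pre.length + j)) := by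
  intro cs
  induction cs with
  | nil => intro pre; simp [pvBlocks]
  | cons c r ih =>
    intro pre
    simp only [pvBlocks, List.map_cons, List.length_cons]
    rw [List.range_succ_eq_map]
    simp only [List.map_cons, List.map_map]
    congr 1
    · simpa using pvGrp_head n pre c r
    · have hseen : pvSeenAfter n [] pre ++ pvNews n (pvSeenAfter n [] pre) c
          = pvSeenAfter n [] (pre ++ [c]) := by
        rw [pvSeenAfter_append]
        simp [pvSeenAfter]
      rw [hseen, ih (pre ++ [c])]
      apply List.map_congr_left
      intro j _
      have hl : (pre ++ [c]) ++ r = pre ++ c :: r := by simp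
      rw [hl]
      simp only [Function.comp_apply, List.length_append, List.length_cons, List.length_nil]
      congr 1
      omega

-- B's fold invariant
theorem pvBfold (clusters : List (List Int)) : ∀ (L : List Int) (d : PySem.Dict Int (List Int)) (fr : List (List Int)),
    (L.foldl (fun (st : PySem.Dict Int (List Int) × List (List Int)) eid =>
        match pyFirstOwner clusters eid with
        | none => (st.1, st.2 ++ [[eid]])
        | some i => (st.1.modify i [] (fun g => g ++ [eid]), st.2)) (d, fr))
    = (L.foldl (fun (d : PySem.Dict Int (List Int)) eid =>
          match pyFirstOwner clusters eid with
          | none => d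
          | some i => d.modify i [] (fun g => g ++ [eid])) d,
       fr ++ (L.filter (fun e => (pyFirstOwner clusters e).isNone)).map (fun e => [e])) := by
  intro L
  induction L with
  | nil => intro d fr; simp
  | cons a L ih =>
    intro d fr
    cases h : pyFirstOwner clusters a with
    | none => simp [List.foldl_cons, h, ih]
    | some i => simp [List.foldl_cons, h, ih]

theorem pvBdict_getD (clusters : List (List Int)) : ∀ (L : List Int) (d : PySem.Dict Int (List Int)) (i : Int),
    (L.foldl (fun (d : PySem.Dict Int (List Int)) eid =>
        match pyFirstOwner clusters eid with
        | none => d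
        | some i => d.modify i [] (fun g => g ++ [eid])) d).getD i []
    = d.getD i [] ++ L.filter (fun e => pyFirstOwner clusters e == some i) := by
  intro L
  induction L with
  | nil => intro d i; simp
  | cons a L ih =>
    intro d i
    cases h : pyFirstOwner clusters a with
    | none => simp [List.foldl_cons, h, ih]
    | some j =>
      simp only [List.foldl_cons, h, List.filter_cons, ih]
      rw [PySem.Dict.getD_modify]
      by_cases hij : i = j
      · subst hij; simp
      · simp [hij]
        omega

theorem pvBdict_contains (clusters : List (List Int)) : ∀ (L : List Int) (d : PySem.Dict Int (List Int)) (i : Int),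
    (L.foldl (fun (d : PySem.Dict Int (List Int)) eid =>
        match pyFirstOwner clusters eid with
        | none => d
        | some i => d.modify i [] (fun g => g ++ [eid])) d).contains i
    = (d.contains i || L.any (fun e => pyFirstOwner clusters e == some i)) := by
  intro L
  induction L with
  | nil => intro d i; simp
  | cons a L ih =>
    intro d i
    cases h : pyFirstOwner clusters a with
    | none => simp [List.foldl_cons, h, ih]
    | some j =>
      simp only [List.foldl_cons, h, List.any_cons, ih, PySem.Dict.contains_modify]
      by_cases hij : i = j
      · subst hij; simp
      · have h1 : (i == j) = false := by simp [hij]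
        have h2 : (j == i) = false := by simp [Ne.symm hij]
        simp [h1, h2]

-- map-then-filter(≠ []) commutes with filter-then-map
theorem pvFilterMap {α : Type} (f : α → List Int) : ∀ (l : List α),
    ((l.map f).filter (fun g => decide (g ≠ []))) = (l.filter (fun a => decide (f a ≠ []))).map f := by
  intro l
  rw [List.filter_map]
  rfl

-- l.any p decides whether l.filter p is nonempty
theorem pvAnyFilter {α : Type} (p : α → Bool) : ∀ (l : List α),
    l.any p = decide (l.filter p ≠ []) := by
  intro l
  by_cases h : l.filter p = []
  · have hall := List.filter_eq_nil_iff.mp h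
    simp only [h, ne_eq, not_true, decide_false]
    rw [List.any_eq_false]
    intro x hx
    simp [hall x hx]
  · simp only [h, ne_eq, not_false_iff, decide_true]
    rw [List.any_eq_true]
    rcases List.exists_mem_of_ne_nil _ h with ⟨x, hx⟩
    have := List.of_mem_filter hx
    exact ⟨x, List.mem_of_mem_filter hx, this⟩

-- B's per-index group equals pvGrp
theorem pvFilterGrp (clusters : List (List Int)) (n : Int) (j : Nat) :
    (PySem.List.pyRange 0 n 1).filter (fun e => pyFirstOwner clusters e == some (j : Int)) = pvGrp clusters n j := by
  unfold pvGrp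
  apply List.filter_congr
  intro e _
  rw [pyFirstOwner_eq]
  cases h : pvFI clusters e with
  | none => simp
  | some k =>
    by_cases hkj : k = j
    · subst hkj; simp
    · have hne : (k : Int) ≠ (j : Int) := by exact_mod_cast hkj
      simp [hkj, hne]

-- ===== VERDICT (by name: the statement is the Claim_ definition above) =====
theorem normalize_clusters_py_spec : Claim_equal_normalize_clusters_py := by
  intro clusters n _
  show normalize_clusters_py clusters n = normalize_clusters_py_alt clusters n
  simp only [normalize_clusters_py, normalize_clusters_py_alt]
  rw [pvBfold clusters]
  simp only [pvOuterA n clusters PySem.Set.empty []]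
  have hempty : (PySem.Set.empty : PySem.Set Int) = ([] : List Int) := rfl
  rw [hempty]
  rw [PySem.List.foldl_append_ite (p := fun eid => eid ∉ pvSeenAfter n [] clusters)
      (f := fun eid => ([eid] : List Int))]
  set D := (PySem.List.pyRange 0 n 1).foldl
      (fun (d : PySem.Dict Int (List Int)) eid =>
        match pyFirstOwner clusters eid with
        | none => d
        | some i => d.modify i [] (fun g => g ++ [eid])) PySem.Dict.empty with hDdef
  have hgetD : ∀ i : Int, D.getD i []
      = (PySem.List.pyRange 0 n 1).filter (fun e => pyFirstOwner clusters e == some i) := by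
    intro i
    rw [hDdef, pvBdict_getD clusters]
    simp
  have hcont : ∀ i : Int, D.contains i
      = (PySem.List.pyRange 0 n 1).any (fun e => pyFirstOwner clusters e == some i) := by
    intro i
    rw [hDdef, pvBdict_contains clusters]
    simp
  congr 1
  · -- the grouped blocks
    have hblocks : (pvBlocks n [] clusters).map (fun g => PySem.List.sorted g (fun x => x) false)
        = (List.range clusters.length).map (fun j => pvGrp clusters n j) := by
      have := pvBlocks_eq_groups n clusters []
      simpa using this
    have h1 : ((pvBlocks n [] clusters).filter (fun b => decide (b ≠ []))).map
          (fun g => PySem.List.sorted g (fun x => x) false)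
        = (((pvBlocks n [] clusters).map (fun g => PySem.List.sorted g (fun x => x) false)).filter
            (fun g => decide (g ≠ []))) := by
      rw [pvFilterMap]
      congr 1
      apply List.filter_congr
      intro b _
      simp [PySem.List.sorted_eq_nil_iff]
    rw [List.nil_append, h1, hblocks, pvFilterMap]
    rw [PySem.List.pyRange_zero_nat clusters.length, List.filter_map, List.map_map]
    have hsets : (List.range clusters.length).filter
          ((fun i => D.contains i) ∘ (fun k : Nat => (k : Int)))
        = (List.range clusters.length).filter (fun j => decide (pvGrp clusters n j ≠ [])) := by
      apply List.filter_congr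
      intro j _
      simp only [Function.comp_apply]
      rw [hcont, pvAnyFilter, pvFilterGrp]
    rw [hsets]
    apply List.map_congr_left
    intro j _
    simp only [Function.comp_apply]
    rw [hgetD, pvFilterGrp]
  · -- the trailing singletons
    rw [List.nil_append]
    congr 1
    apply List.filter_congr
    intro e he
    rw [PySem.List.mem_pyRange_one] at he
    rw [pyFirstOwner_eq]
    cases h : pvFI clusters e with
    | none =>
      have hnf : e ∉ clusters.flatten := (pvFI_none clusters e).mp h
      simp [pvSeenAfter_mem, hnf]
    | some j =>
      have hf : e ∈ clusters.flatten := by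
        by_contra hh
        rw [(pvFI_none clusters e).mpr hh] at h
        simp at h
      have : e ∈ pvSeenAfter n [] clusters :=
        (pvSeenAfter_mem n clusters [] e).mpr (Or.inr ⟨he.1, he.2, hf⟩)
      simp [this]
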